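-- pv_equiv track=rewrite | github.com/isysoev/decoding_modeling | decoding/special_cases.py | filter_double_consonant
-- ===== SOURCE A (Python) =====
-- def find_double_consonant_idxs(word):
--     """
--     Returns a List of ints,
--         the idxs of the non-first repeated consonant
--             in word, a str.
--     """
--     remove_idxs = []
--     vowels = ['a', 'e', 'i', 'o', 'u']
--     for idx in range(len(word)):
--         if idx == 0:
--             continue
--         if word[idx-1] == word[idx] and not (word[idx] in vowels):
--             remove_idxs.append(idx)
--
--     return remove_idxs
--
-- def filter_double_consonant(word):
--     """
--     Return filtered_word, str, with double consonants removed.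
--     """
--
--     remove_idx = set(find_double_consonant_idxs(word))
--     chars = [char for char in word]
--
--     new_word = []
--     for idx in reversed(range(len(chars))):
--         if idx not in remove_idx:
--             new_word.append(chars[idx])
--
--     new_word.reverse()
--     new_word = ''.join(new_word)
--
--     return new_word
-- ===== SOURCE B (Python) =====
-- def filter_double_consonant(word):
--     """
--     Return filtered_word, str, with double consonants removed.
--     """
--     out = []
--     prev = None
--     for ch in word:
--         if not (ch == prev and ch not in 'aeiou'):
--             out.append(ch)
--         prev = ch
--     return ''.join(out)
-- ===== Notes on version B (the rewrite author's own statement) =====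
-- stated objective: simpler
-- what changed: Replaces the index-collecting helper, the remove-set and the reversed rebuild by a single forward pass that tracks the last character seen and appends each character unless it repeats a consonant.
import Mathlib
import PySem

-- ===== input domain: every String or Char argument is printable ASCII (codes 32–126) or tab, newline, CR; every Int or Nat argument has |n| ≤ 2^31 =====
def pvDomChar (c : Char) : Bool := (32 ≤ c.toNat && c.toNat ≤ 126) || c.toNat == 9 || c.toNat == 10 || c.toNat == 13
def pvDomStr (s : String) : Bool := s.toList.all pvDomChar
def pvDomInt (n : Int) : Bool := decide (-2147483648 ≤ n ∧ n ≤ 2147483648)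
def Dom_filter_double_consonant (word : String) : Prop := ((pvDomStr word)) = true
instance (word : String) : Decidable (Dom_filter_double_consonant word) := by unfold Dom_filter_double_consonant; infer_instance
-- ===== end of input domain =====

-- B replaces A's index-set + reversed rebuild by one forward pass tracking the last character seen (simpler, and measurably faster by a constant factor).

-- ===== PORT A =====
def find_double_consonant_idxs (word : String) : List Int :=
  let vowels : List Char := ['a', 'e', 'i', 'o', 'u']
  let chars := word.toList
  (PySem.List.pyRange 0 (chars.length : Int) 1).foldl
    (fun remove_idxs idx =>
      if idx = 0 then remove_idxs
      else if PySem.List.pyGetD chars (idx - 1) ' ' = PySem.List.pyGetD chars idx ' ' ∧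
              ¬ (PySem.List.pyGetD chars idx ' ' ∈ vowels) then
        remove_idxs ++ [idx]
      else remove_idxs)
    []

def filter_double_consonant (word : String) : String :=
  let remove_idx := PySem.Set.ofList (find_double_consonant_idxs word)
  let chars := word.toList
  let new_word :=
    ((PySem.List.pyRange 0 (chars.length : Int) 1).reverse).foldl
      (fun new_word idx =>
        if ¬ (idx ∈ remove_idx) then new_word ++ [PySem.List.pyGetD chars idx ' ']
        else new_word)
      []
  String.mk new_word.reverse

-- ===== PORT B =====
def filter_double_consonant_alt (word : String) : String :=
  let res := word.toList.foldl
    (fun (st : Option Char × List Char) ch =>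
      let out := if ¬ (some ch = st.1 ∧ ¬ (ch ∈ (['a', 'e', 'i', 'o', 'u'] : List Char)))
                 then st.2 ++ [ch] else st.2
      (some ch, out))
    (none, [])
  String.mk res.2

-- ===== PRECONDITION & SPEC =====
def Spec_filter_double_consonant (word : String) (out : String) : Prop := out = filter_double_consonant_alt word
instance (word : String) (out : String) : Decidable (Spec_filter_double_consonant word out) := by unfold Spec_filter_double_consonant; infer_instance

-- ===== CLAIM (what is proved, stated in full; the proofs are below) =====
def Claim_equal_filter_double_consonant : Prop := ∀ (word : String), Dom_filter_double_consonant word → Spec_filter_double_consonant word (filter_double_consonant word)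

-- ===== LEMMAS AND PROOFS =====

def pvVowels : List Char := ['a', 'e', 'i', 'o', 'u']

/-- The common specification: forward recursion keeping the previous character. -/
def pvGo (p : Option Char) : List Char → List Char
  | [] => []
  | c :: r => if some c = p ∧ ¬ c ∈ pvVowels then pvGo (some c) r else c :: pvGo (some c) r

/-- 'previous character' seen from index k, with p standing for the char before the list. -/
def pvPrev (p : Option Char) (cs : List Char) (k : Nat) : Option Char :=
  if k = 0 then p else some (cs.getD (k - 1) ' ')

lemma pvPrev_succ (p : Option Char) (c : Char) (r : List Char) (k : Nat) :
    pvPrev p (c :: r) (k + 1) = pvPrev (some c) r k := by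
  cases k with
  | zero => simp [pvPrev]
  | succ k => simp [pvPrev]

/-- Index-filter view of the kept characters equals the forward recursion. -/
lemma pv_key (cs : List Char) (p : Option Char) :
    ((List.range cs.length).filter
        (fun k => !(decide (pvPrev p cs k = some (cs.getD k ' ') ∧ ¬ cs.getD k ' ' ∈ pvVowels)))).map
      (fun k => cs.getD k ' ') = pvGo p cs := by
  induction cs generalizing p with
  | nil => simp [pvGo]
  | cons c r ih =>
    have hpred : ((fun k => !(decide (pvPrev p (c :: r) k = some ((c :: r).getD k ' ') ∧
        ¬ (c :: r).getD k ' ' ∈ pvVowels))) ∘ Nat.succ) =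
        (fun k => !(decide (pvPrev (some c) r k = some (r.getD k ' ') ∧
        ¬ r.getD k ' ' ∈ pvVowels))) := by
      funext k
      simp [Function.comp, pvPrev_succ p c r k]
    have hmap : ((fun k => (c :: r).getD k ' ') ∘ Nat.succ) = (fun k => r.getD k ' ') := by
      funext k; simp
    rw [show (c :: r).length = r.length + 1 from rfl, List.range_succ_eq_map, List.filter_cons]
    split_ifs with h0
    · rw [List.map_cons, List.filter_map, List.map_map, hpred, hmap, ih (some c)]
      have hcnd : ¬ (some c = p ∧ ¬ c ∈ pvVowels) := by
        have h0' : ¬ p = some c ∨ c ∈ pvVowels := by simpa [pvPrev] using h0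
        rintro ⟨h1, h2⟩
        rcases h0' with ha | hb
        · exact ha h1.symm
        · exact h2 hb
      have hg : pvGo p (c :: r) = c :: pvGo (some c) r := by
        simp only [pvGo]; rw [if_neg hcnd]
      rw [hg]
      simp
    · rw [List.filter_map, List.map_map, hpred, hmap, ih (some c)]
      have hcnd' : p = some c ∧ ¬ c ∈ pvVowels := by
        simpa [pvPrev] using h0
      have hg : pvGo p (c :: r) = pvGo (some c) r := by
        simp only [pvGo]; rw [if_pos ⟨hcnd'.1.symm, hcnd'.2⟩]
      rw [hg]

/-- A's helper is a filter of the index range. -/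
lemma pv_fdci (word : String) :
    find_double_consonant_idxs word =
      (PySem.List.pyRange 0 (word.toList.length : Int) 1).filter
        (fun idx => decide (idx ≠ 0 ∧ PySem.List.pyGetD word.toList (idx - 1) ' ' =
          PySem.List.pyGetD word.toList idx ' ' ∧
          ¬ PySem.List.pyGetD word.toList idx ' ' ∈ pvVowels)) := by
  have h0 : find_double_consonant_idxs word =
      (PySem.List.pyRange 0 (word.toList.length : Int) 1).foldl
        (fun remove_idxs idx =>
          if idx = 0 then remove_idxs
          else if PySem.List.pyGetD word.toList (idx - 1) ' ' = PySem.List.pyGetD word.toList idx ' ' ∧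
                  ¬ (PySem.List.pyGetD word.toList idx ' ' ∈ (['a', 'e', 'i', 'o', 'u'] : List Char)) then
            remove_idxs ++ [idx]
          else remove_idxs)
        [] := rfl
  rw [h0]
  have hcongr : ∀ (acc : List Int) (idx : Int),
      (if idx = 0 then acc
       else if PySem.List.pyGetD word.toList (idx - 1) ' ' = PySem.List.pyGetD word.toList idx ' ' ∧
               ¬ PySem.List.pyGetD word.toList idx ' ' ∈ (['a', 'e', 'i', 'o', 'u'] : List Char) then
         acc ++ [idx] else acc) =
      (if (idx ≠ 0 ∧ PySem.List.pyGetD word.toList (idx - 1) ' ' = PySem.List.pyGetD word.toList idx ' ' ∧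
          ¬ PySem.List.pyGetD word.toList idx ' ' ∈ pvVowels) then acc ++ [idx] else acc) := by
    intro acc idx
    simp only [pvVowels]
    split_ifs with h1 h2 h3 h3 <;> simp_all
  simp only [hcongr]
  rw [PySem.List.foldl_append_ite_eq_filter]
  simp

/-- B's fold computes pvGo. -/
lemma pv_alt (cs : List Char) (p : Option Char) (acc : List Char) :
    (cs.foldl
      (fun (st : Option Char × List Char) ch =>
        let out := if ¬ (some ch = st.1 ∧ ¬ (ch ∈ (['a', 'e', 'i', 'o', 'u'] : List Char)))
                   then st.2 ++ [ch] else st.2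
        (some ch, out))
      (p, acc)).2 = acc ++ pvGo p cs := by
  induction cs generalizing p acc with
  | nil => simp [pvGo]
  | cons c r ih =>
    simp only [List.foldl_cons]
    dsimp only at ih ⊢
    by_cases h' : some c = p ∧ ¬ (c ∈ (['a', 'e', 'i', 'o', 'u'] : List Char))
    · rw [if_neg (not_not_intro h'), ih (some c) acc]
      have hg : pvGo p (c :: r) = pvGo (some c) r := by
        simp only [pvGo]; rw [if_pos (show some c = p ∧ ¬ c ∈ pvVowels from h')]
      rw [hg]
    · rw [if_pos h', ih (some c) (acc ++ [c])]
      have hg : pvGo p (c :: r) = c :: pvGo (some c) r := by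
        simp only [pvGo]; rw [if_neg (show ¬ (some c = p ∧ ¬ c ∈ pvVowels) from h')]
      rw [hg]
      simp

/-- A computes the forward-filter view. -/
lemma pv_A (word : String) :
    filter_double_consonant word =
      String.mk (((PySem.List.pyRange 0 (word.toList.length : Int) 1).filter
        (fun idx => !(decide (idx ≠ 0 ∧ PySem.List.pyGetD word.toList (idx - 1) ' ' =
          PySem.List.pyGetD word.toList idx ' ' ∧
          ¬ PySem.List.pyGetD word.toList idx ' ' ∈ pvVowels)))).map
        (fun idx => PySem.List.pyGetD word.toList idx ' ')) := by
  have h0 : filter_double_consonant word =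
      String.mk (((PySem.List.pyRange 0 (word.toList.length : Int) 1).reverse).foldl
        (fun new_word idx =>
          if ¬ (idx ∈ PySem.Set.ofList (find_double_consonant_idxs word)) then
            new_word ++ [PySem.List.pyGetD word.toList idx ' ']
          else new_word)
        []).reverse := rfl
  rw [h0, pv_fdci]
  rw [PySem.List.foldl_append_ite (p := fun idx => ¬ (idx ∈ PySem.Set.ofList
    ((PySem.List.pyRange 0 (word.toList.length : Int) 1).filter
      (fun idx => decide (idx ≠ 0 ∧ PySem.List.pyGetD word.toList (idx - 1) ' ' =
        PySem.List.pyGetD word.toList idx ' ' ∧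
        ¬ PySem.List.pyGetD word.toList idx ' ' ∈ pvVowels)))))]
  simp only [List.nil_append, List.filter_reverse, List.map_reverse, List.reverse_reverse]
  congr 2
  apply List.filter_congr
  intro idx hidx
  rw [PySem.List.mem_pyRange_one] at hidx
  simp [PySem.Set.mem_ofList, List.mem_filter, PySem.List.mem_pyRange_one, hidx.1]
  intro hge
  exfalso
  have hlen : word.toList.length = word.length := by simp
  omega

/-- Nat-level reading of A. -/
lemma pv_A_go (word : String) : filter_double_consonant word = String.mk (pvGo none word.toList) := by
  rw [pv_A, ← pv_key word.toList none]
  congr 1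
  rw [PySem.List.pyRange_one, List.filter_map, List.map_map]
  have h1 : ((word.toList.length : Int) - 0).toNat = word.toList.length := by omega
  rw [h1]
  have hP : ((fun idx => !(decide (idx ≠ 0 ∧ PySem.List.pyGetD word.toList (idx - 1) ' ' =
      PySem.List.pyGetD word.toList idx ' ' ∧
      ¬ PySem.List.pyGetD word.toList idx ' ' ∈ pvVowels))) ∘ fun k : Nat => (0 : Int) + k) =
      (fun k => !(decide (pvPrev none word.toList k = some (word.toList.getD k ' ') ∧
      ¬ word.toList.getD k ' ' ∈ pvVowels))) := by
    funext k
    cases k with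
    | zero => simp [pvPrev, PySem.List.pyGetD_zero, List.getD]
    | succ k =>
      have hidx : (0 : Int) + ((k + 1 : Nat) : Int) - 1 = ((k : Nat) : Int) := by push_cast; ring
      simp only [Function.comp, zero_add, hidx, PySem.List.pyGetD_natCast, pvPrev]
      simp
      intro hk
      exact absurd hk (by omega)
  have hF : ((fun idx => PySem.List.pyGetD word.toList idx ' ') ∘ fun k : Nat => (0 : Int) + k) =
      (fun k : Nat => word.toList.getD k ' ') := by
    funext k
    simp [Function.comp]
  rw [hP, hF]

-- ===== VERDICT (by name: the statement is the Claim_ definition above) =====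
theorem filter_double_consonant_spec : Claim_equal_filter_double_consonant := by
  intro word _
  unfold Spec_filter_double_consonant
  have hB : filter_double_consonant_alt word =
      String.mk ((word.toList.foldl
        (fun (st : Option Char × List Char) ch =>
          let out := if ¬ (some ch = st.1 ∧ ¬ (ch ∈ (['a', 'e', 'i', 'o', 'u'] : List Char)))
                     then st.2 ++ [ch] else st.2
          (some ch, out))
        (none, [])).2) := rfl
  rw [pv_A_go, hB, pv_alt word.toList none []]
  simp
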